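-- pv_equiv track=rewrite | github.com/PresetyX/sat-solver | sat_solver.py | cnf_to_dimacs
-- ===== SOURCE A (Python) =====
-- from typing import List, Set, Dict, Optional, Tuple
--
-- def cnf_to_dimacs(cnf: List[List[int]]) -> str:
--     """Convert CNF formula to DIMACS format.
--
--     Args:
--         cnf: CNF formula as list of clauses
--
--     Returns:
--         String in DIMACS CNF format
--     """
--     if not cnf:
--         return "p cnf 0 0\n"
--
--     # Find number of variables
--     variables = set()
--     for clause in cnf:
--         for literal in clause:
--             variables.add(abs(literal))
--
--     num_vars = max(variables) if variables else 0
--     num_clauses = len(cnf)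
--
--     dimacs = f"p cnf {num_vars} {num_clauses}\n"
--
--     for clause in cnf:
--         dimacs += " ".join(str(lit) for lit in clause) + " 0\n"
--
--     return dimacs
-- ===== SOURCE B (Python) =====
-- def cnf_to_dimacs(cnf):
--     """Convert CNF formula to DIMACS format.
--
--     Recursive formulation: the body and the variable count are computed
--     together by structural recursion on the clause list (back-to-front),
--     and each clause line is rendered by a recursive formatter whose base
--     case is the " 0\n" terminator; no set and no join are used.
--     """
--     if not cnf:
--         return "p cnf 0 0\n"
--
--     def clause_line(lits):
--         if not lits:
--             return " 0\n"
--         if len(lits) == 1: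
--             return str(lits[0]) + " 0\n"
--         return str(lits[0]) + " " + clause_line(lits[1:])
--
--     def build(clauses):
--         if not clauses:
--             return 0, ""
--         m, body = build(clauses[1:])
--         for lit in clauses[0]:
--             a = abs(lit)
--             if a > m:
--                 m = a
--         return m, clause_line(clauses[0]) + body
--
--     max_var, body = build(cnf)
--     return "p cnf {} {}\n".format(max_var, len(cnf)) + body
-- ===== Notes on version B (the rewrite author's own statement) =====
-- stated objective: alternative
-- what changed: B replaces A's staged set-collection + max() + string-concatenation loops with a single structural recursion over the clause list that returns (max_var, body) built back-to-front, and renders each clause line by a recursive formatter whose base case is the ' 0\n' terminator instead of join.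
import Mathlib
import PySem

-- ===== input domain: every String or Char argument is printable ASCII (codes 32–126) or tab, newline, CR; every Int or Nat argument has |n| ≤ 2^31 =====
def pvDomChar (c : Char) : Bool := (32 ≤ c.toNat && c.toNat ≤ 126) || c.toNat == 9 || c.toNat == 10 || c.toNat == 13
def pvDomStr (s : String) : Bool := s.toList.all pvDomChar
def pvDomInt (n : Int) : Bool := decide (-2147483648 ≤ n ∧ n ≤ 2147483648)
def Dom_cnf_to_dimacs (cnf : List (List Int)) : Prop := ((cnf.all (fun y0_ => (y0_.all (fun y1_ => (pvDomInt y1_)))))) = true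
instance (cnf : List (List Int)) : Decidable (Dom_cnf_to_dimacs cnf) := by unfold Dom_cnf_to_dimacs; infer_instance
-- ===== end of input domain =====

-- B rebuilds the DIMACS text by structural recursion (back-to-front) instead of A's staged set/max/concat loops; return values proved equal.
-- ===== PORT A =====
def cnf_to_dimacs (cnf : List (List Int)) : String :=
  if cnf = [] then "p cnf 0 0\n"
  else
    let vars_ : PySem.Set Int :=
      cnf.foldl (fun vs clause => clause.foldl (fun vs lit => PySem.Set.add vs |lit|) vs) PySem.Set.empty
    let num_vars : Int :=
      match PySem.List.max? vars_ (fun x => x) with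
      | some m => m
      | none => 0
    let num_clauses : Int := (cnf.length : Int)
    let dimacs : String :=
      "p cnf " ++ PySem.Int.toStr num_vars ++ " " ++ PySem.Int.toStr num_clauses ++ "\n"
    cnf.foldl (fun dimacs clause =>
      dimacs ++ (PySem.Str.join " " (clause.map PySem.Int.toStr) ++ " 0\n")) dimacs

-- ===== PORT B =====
-- clause_line: recursive formatter, base case is the " 0\n" terminator
def pvClauseLine : List Int → String
  | [] => " 0\n"
  | [x] => PySem.Int.toStr x ++ " 0\n"
  | x :: rest => PySem.Int.toStr x ++ " " ++ pvClauseLine rest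

-- build: structural recursion returning (max_var, body), assembled back-to-front
def pvBuild : List (List Int) → Int × String
  | [] => (0, "")
  | c :: rest =>
    let p := pvBuild rest
    let m := c.foldl (fun m lit => let a := |lit|; if a > m then a else m) p.1
    (m, pvClauseLine c ++ p.2)

def cnf_to_dimacs_alt (cnf : List (List Int)) : String :=
  if cnf = [] then "p cnf 0 0\n"
  else
    let p := pvBuild cnf
    "p cnf " ++ PySem.Int.toStr p.1 ++ " " ++ PySem.Int.toStr (cnf.length : Int) ++ "\n" ++ p.2

-- ===== PRECONDITION & SPEC =====
def Spec_cnf_to_dimacs (cnf : List (List Int)) (out : String) : Prop := out = cnf_to_dimacs_alt cnf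
instance (cnf : List (List Int)) (out : String) : Decidable (Spec_cnf_to_dimacs cnf out) := by unfold Spec_cnf_to_dimacs; infer_instance

-- ===== CLAIM (what is proved, stated in full; the proofs are below) =====
def Claim_equal_cnf_to_dimacs : Prop := ∀ (cnf : List (List Int)), Dom_cnf_to_dimacs cnf → Spec_cnf_to_dimacs cnf (cnf_to_dimacs cnf)

-- ===== LEMMAS AND PROOFS =====

-- "".join of a cons
lemma str_join_nil_cons (p : String) (ps : List String) :
    PySem.Str.join "" (p :: ps) = p ++ PySem.Str.join "" ps := by
  apply String.ext
  simp [PySem.Str.toList_join]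
  cases ps <;> simp [PySem.Chars.join_cons_cons, PySem.Chars.join_singleton, PySem.Chars.join_nil]

lemma str_join_nil_nil : PySem.Str.join "" ([] : List String) = "" := by
  apply String.ext
  simp [PySem.Str.toList_join, PySem.Chars.join_nil]

-- " ".join of a cons with nonempty tail
lemma str_join_sp_cons (p q : String) (ps : List String) :
    PySem.Str.join " " (p :: q :: ps) = p ++ " " ++ PySem.Str.join " " (q :: ps) := by
  apply String.ext
  simp [PySem.Str.toList_join, PySem.Chars.join_cons_cons]

lemma str_join_sp_single (p : String) : PySem.Str.join " " [p] = p := by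
  apply String.ext
  simp [PySem.Str.toList_join, PySem.Chars.join_singleton]

lemma str_join_sp_nil : PySem.Str.join " " ([] : List String) = "" := by
  apply String.ext
  simp [PySem.Str.toList_join, PySem.Chars.join_nil]

-- B's clause formatter = A's join-based line
lemma clauseLine_eq : ∀ (c : List Int),
    pvClauseLine c = PySem.Str.join " " (c.map PySem.Int.toStr) ++ " 0\n" := by
  intro c
  induction c with
  | nil => simp [pvClauseLine, str_join_sp_nil]
  | cons x t ih =>
      cases t with
      | nil => simp [pvClauseLine, str_join_sp_single]
      | cons y s =>
          simp only [pvClauseLine, ih, List.map_cons]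
          rw [str_join_sp_cons]
          simp [String.append_assoc]

-- string-accumulator fold = accumulator ++ "".join of the mapped lines
lemma foldl_str_append (g : List Int → String) :
    ∀ (cs : List (List Int)) (h : String),
      cs.foldl (fun s c => s ++ g c) h = h ++ PySem.Str.join "" (cs.map g) := by
  intro cs
  induction cs with
  | nil => intro h; simp [str_join_nil_nil]
  | cons c cs ih =>
      intro h
      simp only [List.foldl_cons, List.map_cons, ih, str_join_nil_cons, String.append_assoc]

-- B's body (built back-to-front) = "".join of the clause lines
lemma build_snd : ∀ (cnf : List (List Int)),
    (pvBuild cnf).2 = PySem.Str.join "" (cnf.map pvClauseLine) := by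
  intro cnf
  induction cnf with
  | nil => simp [pvBuild, str_join_nil_nil]
  | cons c rest ih => simp [pvBuild, ih, str_join_nil_cons]

-- folding max from a shifted accumulator
lemma foldr_max_shift : ∀ (t : List Int) (a y : Int),
    t.foldr (fun y b => max b y) (max a y) = max (t.foldr (fun y b => max b y) a) y := by
  intro t
  induction t with
  | nil => intro a y; rfl
  | cons z t ih =>
      intro a y
      simp only [List.foldr_cons, ih]
      rw [max_right_comm]

-- foldl max = foldr max
lemma foldl_max_eq_foldr : ∀ (L : List Int) (a : Int),
    L.foldl (fun b y => max b y) a = L.foldr (fun y b => max b y) a := by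
  intro L
  induction L with
  | nil => intro a; rfl
  | cons y t ih =>
      intro a
      simp only [List.foldl_cons, List.foldr_cons, ih, foldr_max_shift]

-- B's running max = foldl max 0 over the |literals|
lemma build_fst : ∀ (cnf : List (List Int)),
    (pvBuild cnf).1 = (cnf.flatMap (fun c => c.map (fun l => |l|))).foldl (fun b y => max b y) 0 := by
  have hif : (fun (m lit : Int) => let a := |lit|; if a > m then a else m)
      = fun m lit => max m |lit| := by
    funext m lit
    simp only [max_def]
    split_ifs <;> omega
  intro cnf
  rw [foldl_max_eq_foldr]
  induction cnf with
  | nil => rfl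
  | cons c rest ih =>
      simp only [pvBuild, hif, List.flatMap_cons, List.foldr_append]
      rw [ih, ← foldl_max_eq_foldr, ← List.foldl_map]
      exact foldl_max_eq_foldr _ _

-- max over the set of values = running max from 0, for nonnegative values
lemma max_set_eq_foldl (L : List Int) (hpos : ∀ x ∈ L, 0 ≤ x) :
    (match PySem.List.max? (PySem.Set.ofList L) (fun x => x) with
      | some m => m | none => 0) = L.foldl (fun a y => max a y) 0 := by
  cases h : PySem.List.max? (PySem.Set.ofList L) (fun x => x) with
  | none =>
      rw [PySem.List.max?_eq_none_iff] at h
      have : L = [] := by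
        cases L with
        | nil => rfl
        | cons x t =>
            exfalso
            have := (PySem.Set.mem_ofList (x :: t) x).mpr (by simp)
            rw [h] at this; simp at this
      subst this; rfl
  | some m =>
      have hm : m ∈ L := (PySem.Set.mem_ofList L m).mp (PySem.List.max?_mem h)
      have hmax : ∀ y ∈ L, y ≤ m := fun y hy =>
        PySem.List.max?_isMax h y ((PySem.Set.mem_ofList L y).mpr hy)
      have hle := PySem.List.le_foldl_max L 0
      have hmem := PySem.List.foldl_max_mem L 0
      simp only []
      apply le_antisymm
      · exact hle.2 m hm
      · rcases hmem with h0 | hmemL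
        · rw [h0]; exact hpos m hm
        · exact hmax _ hmemL

-- A's num_vars computation = B's running max
lemma numvars_eq (cnf : List (List Int)) :
    (match PySem.List.max?
        (cnf.foldl (fun vs clause => clause.foldl (fun vs lit => PySem.Set.add vs |lit|) vs) PySem.Set.empty)
        (fun x => x) with
      | some m => m | none => 0)
    = (pvBuild cnf).1 := by
  have hset : cnf.foldl (fun vs clause => clause.foldl (fun vs lit => PySem.Set.add vs |lit|) vs) PySem.Set.empty
      = PySem.Set.ofList (cnf.flatMap (fun c => c.map (fun l => |l|))) := by
    rw [PySem.Set.ofList_eq_foldl, List.foldl_flatMap]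
    simp only [List.foldl_map]
    rfl
  rw [hset, build_fst]
  apply max_set_eq_foldl
  intro x hx
  simp only [List.mem_flatMap, List.mem_map] at hx
  obtain ⟨c, _, l, _, rfl⟩ := hx
  exact abs_nonneg l

-- ===== VERDICT (by name: the statement is the Claim_ definition above) =====
theorem cnf_to_dimacs_spec : Claim_equal_cnf_to_dimacs := by
  intro cnf _
  unfold Spec_cnf_to_dimacs
  by_cases hc : cnf = []
  · subst hc; rfl
  · simp only [cnf_to_dimacs, cnf_to_dimacs_alt, if_neg hc]
    rw [foldl_str_append, numvars_eq, build_snd]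
    have : cnf.map (fun c => PySem.Str.join " " (c.map PySem.Int.toStr) ++ " 0\n")
        = cnf.map pvClauseLine := (List.map_congr_left (fun c _ => (clauseLine_eq c).symm))
    rw [this]
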